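-- pv_equiv track=rewrite | github.com/AdeptLearner123/code-names-bot-processing-legacy | Scripts/breadth_first_search.py | get_combined_paths
-- ===== SOURCE A (Python) =====
-- def get_paths(links, page_id):
--     if page_id is None or page_id not in links:
--         return [[]]
--
--     paths = []
--     for parent_id in links[page_id]:
--         parent_paths = get_paths(links, parent_id)
--         for parent_path in parent_paths:
--             parent_path.append(page_id)
--             paths.append(parent_path)
--
--     return paths
--
-- def get_combined_paths(visited_forward, unvisited_forward, visited_backward, unvisited_backward):
--     paths = []
--     for page_id in unvisited_forward:
--         if page_id in unvisited_backward:
--             from_paths = get_paths(visited_forward, page_id)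
--             to_paths = get_paths(visited_backward, page_id)
--             for from_path in from_paths:
--                 for to_path in to_paths:
--                     new_path = list(from_path[:-1]) + list(reversed(to_path))
--                     paths.append(new_path)
--     return paths
-- ===== SOURCE B (Python) =====
-- def _get_paths_memo(links, page_id, memo):
--     # Top-down DP over the parent DAG: each node's path list is computed once and cached.
--     if page_id not in links:
--         return [[]]
--     cached = memo.get(page_id)
--     if cached is not None:
--         return cached
--     result = [bp + [page_id]
--               for p in links[page_id]
--               for bp in _get_paths_memo(links, p, memo)]
--     memo[page_id] = result
--     return result
--
--
-- def get_combined_paths(visited_forward, unvisited_forward, visited_backward, unvisited_backward):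
--     meet = set(unvisited_backward)
--     memo_f = {}
--     memo_b = {}
--     return [fp[:-1] + list(reversed(tp))
--             for page_id in unvisited_forward if page_id in meet
--             for fp in _get_paths_memo(visited_forward, page_id, memo_f)
--             for tp in _get_paths_memo(visited_backward, page_id, memo_b)]
-- ===== Notes on version B (the rewrite author's own statement) =====
-- stated objective: alternative
-- what changed: B replaces A's naive re-recursion (get_paths recomputes a parent's whole path set at every call site) by a memoised dynamic program: a dict mapping page_id to its full path list, shared across the two halves' lookups, so each node's path set is computed exactly once; the combination of forward and backward halves is a single comprehension over the meeting pages.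
import Mathlib
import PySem

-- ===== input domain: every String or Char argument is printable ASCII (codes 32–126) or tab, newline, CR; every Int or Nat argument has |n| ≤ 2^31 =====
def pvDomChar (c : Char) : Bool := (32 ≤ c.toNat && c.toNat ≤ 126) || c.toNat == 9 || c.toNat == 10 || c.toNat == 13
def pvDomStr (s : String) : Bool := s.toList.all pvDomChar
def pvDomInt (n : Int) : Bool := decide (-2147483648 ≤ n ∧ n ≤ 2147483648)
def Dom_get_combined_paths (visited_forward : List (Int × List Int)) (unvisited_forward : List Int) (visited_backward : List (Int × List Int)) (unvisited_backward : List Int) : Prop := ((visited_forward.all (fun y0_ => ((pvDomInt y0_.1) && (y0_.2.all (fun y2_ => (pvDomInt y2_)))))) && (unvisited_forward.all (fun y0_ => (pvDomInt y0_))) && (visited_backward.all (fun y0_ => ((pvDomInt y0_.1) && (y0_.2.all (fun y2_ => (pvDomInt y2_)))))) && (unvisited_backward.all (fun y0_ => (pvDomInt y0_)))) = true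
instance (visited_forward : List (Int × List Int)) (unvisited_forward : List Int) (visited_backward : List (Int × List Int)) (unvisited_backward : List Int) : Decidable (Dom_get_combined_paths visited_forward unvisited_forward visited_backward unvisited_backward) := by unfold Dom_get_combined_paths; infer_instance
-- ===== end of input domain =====

-- B replaces A's naive re-recursion by a memoised DP (each node's path list computed once);
-- equivalence is about the RETURN value (A mutates only lists it freshly builds, not its arguments).

-- ===== PORT A =====
-- get_paths: recursion ported with a fuel bound (links.length + 1); under Pre_ the fuel is never
-- exhausted (fuel exhaustion returns [], reached only outside Pre_, where Python A recurses forever).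
-- 'page_id is None' never holds for an Int argument and is dropped.
def pvGetPaths (links : List (Int × List Int)) : Nat → Int → List (List Int)
  | 0, _ => []
  | fuel + 1, page_id =>
    match PySem.Dict.get? (PySem.Dict.mk links) page_id with
    | none => [[]]
    | some parents =>
        parents.foldl (fun paths parent_id =>
          (pvGetPaths links fuel parent_id).foldl
            (fun paths parent_path => paths ++ [parent_path ++ [page_id]]) paths) []

def get_combined_paths (visited_forward : List (Int × List Int)) (unvisited_forward : List Int) (visited_backward : List (Int × List Int)) (unvisited_backward : List Int) : List (List Int) :=
  unvisited_forward.foldl (fun paths page_id =>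
    if unvisited_backward.contains page_id then
      let from_paths := pvGetPaths visited_forward (visited_forward.length + 1) page_id
      let to_paths := pvGetPaths visited_backward (visited_backward.length + 1) page_id
      from_paths.foldl (fun paths from_path =>
        to_paths.foldl (fun paths to_path =>
          paths ++ [from_path.dropLast ++ to_path.reverse]) paths) paths  -- from_path[:-1] = dropLast
    else paths) []

-- ===== PORT B =====
-- _get_paths_memo: top-down memoised DP; the Python recursion is ported with a fuel bound
-- (links.length + 1); under Pre_ the fuel is never exhausted (fuel exhaustion returns [],
-- reached only outside Pre_, where Python B recurses forever exactly like A).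
-- The comprehension with a mutated memo dict becomes a fold threading (memo, result).
def pvGetPathsMemo (links : List (Int × List Int)) : Nat → Int → PySem.Dict Int (List (List Int)) → PySem.Dict Int (List (List Int)) × List (List Int)
  | 0, _, memo => (memo, [])
  | fuel + 1, page_id, memo =>
    match (PySem.Dict.mk links).get? page_id with
    | none => (memo, [[]])
    | some parents =>
      match memo.get? page_id with
      | some cached => (memo, cached)
      | none =>
        let st := parents.foldl (fun (st : PySem.Dict Int (List (List Int)) × List (List Int)) p =>
            let r := pvGetPathsMemo links fuel p st.1
            (r.1, st.2 ++ r.2.map (fun bp => bp ++ [page_id]))) (memo, [])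
        (st.1.insert page_id st.2, st.2)

def get_combined_paths_alt (visited_forward : List (Int × List Int)) (unvisited_forward : List Int) (visited_backward : List (Int × List Int)) (unvisited_backward : List Int) : List (List Int) :=
  let meet : PySem.Set Int := PySem.Set.ofList unvisited_backward
  (unvisited_forward.foldl (fun (st : PySem.Dict Int (List (List Int)) × PySem.Dict Int (List (List Int)) × List (List Int)) page_id =>
      if PySem.Set.contains meet page_id then
        let rf := pvGetPathsMemo visited_forward (visited_forward.length + 1) page_id st.1
        let rb := pvGetPathsMemo visited_backward (visited_backward.length + 1) page_id st.2.1
        (rf.1, rb.1, st.2.2 ++ rf.2.flatMap (fun fp => rb.2.map (fun tp => fp.dropLast ++ tp.reverse)))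
      else st)
    (PySem.Dict.empty, PySem.Dict.empty, [])).2.2

-- ===== PRECONDITION & SPEC =====
-- pvGroundedIter links n: the standard grounded (well-founded) core of the parent graph after n
-- widening steps — the keys all of whose ancestry chains are cycle-free of height < n.
def pvGroundedIter (links : List (Int × List Int)) : Nat → List Int
  | 0 => []
  | n + 1 => (links.map Prod.fst).filter (fun k =>
      (((PySem.Dict.mk links).get? k).getD []).all
        (fun p => !((PySem.Dict.mk links).contains p) || (pvGroundedIter links n).contains p))

-- Pre_ admits exactly the inputs on which Python A returns: the dict arguments have distinct keys
-- (automatic for a real Python dict; stated because the association-list encoding does not force it),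
-- and from every queried page (a member of both unvisited lists) no cycle of either visited dict is
-- reachable — i.e. the page lies in the grounded core — since otherwise Python A's recursion is infinite.
def Pre_get_combined_paths (visited_forward : List (Int × List Int)) (unvisited_forward : List Int) (visited_backward : List (Int × List Int)) (unvisited_backward : List Int) : Prop :=
  (visited_forward.map Prod.fst).Nodup ∧ (visited_backward.map Prod.fst).Nodup ∧
  ∀ p ∈ unvisited_forward, p ∈ unvisited_backward →
    ((PySem.Dict.mk visited_forward).contains p = true → p ∈ pvGroundedIter visited_forward visited_forward.length) ∧
    ((PySem.Dict.mk visited_backward).contains p = true → p ∈ pvGroundedIter visited_backward visited_backward.length)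
instance (visited_forward : List (Int × List Int)) (unvisited_forward : List Int) (visited_backward : List (Int × List Int)) (unvisited_backward : List Int) : Decidable (Pre_get_combined_paths visited_forward unvisited_forward visited_backward unvisited_backward) := by unfold Pre_get_combined_paths; infer_instance

def pvWitness_get_combined_paths : (List (Int × List Int)) × List Int × (List (Int × List Int)) × List Int :=
  ([(1, [0]), (2, [1, 1])], [2, 5], [(2, [3])], [2])

def Spec_get_combined_paths (visited_forward : List (Int × List Int)) (unvisited_forward : List Int) (visited_backward : List (Int × List Int)) (unvisited_backward : List Int) (out : List (List Int)) : Prop := out = get_combined_paths_alt visited_forward unvisited_forward visited_backward unvisited_backward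
instance (visited_forward : List (Int × List Int)) (unvisited_forward : List Int) (visited_backward : List (Int × List Int)) (unvisited_backward : List Int) (out : List (List Int)) : Decidable (Spec_get_combined_paths visited_forward unvisited_forward visited_backward unvisited_backward out) := by unfold Spec_get_combined_paths; infer_instance

-- ===== CLAIM (what is proved, stated in full; the proofs are below) =====
def Claim_equal_get_combined_paths : Prop := ∀ (visited_forward : List (Int × List Int)) (unvisited_forward : List Int) (visited_backward : List (Int × List Int)) (unvisited_backward : List Int), Dom_get_combined_paths visited_forward unvisited_forward visited_backward unvisited_backward → Pre_get_combined_paths visited_forward unvisited_forward visited_backward unvisited_backward → Spec_get_combined_paths visited_forward unvisited_forward visited_backward unvisited_backward (get_combined_paths visited_forward unvisited_forward visited_backward unvisited_backward)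


-- ===== LEMMAS AND PROOFS =====

-- The invariant carried through the memo dictionary.
def pvInv (links : List (Int × List Int)) (memo : PySem.Dict Int (List (List Int))) : Prop :=
  memo.keys.Nodup ∧
  (∀ k, (memo.get? k).isSome = true → (PySem.Dict.mk links).contains k = true) ∧
  (∀ k v, memo.get? k = some v → ∀ g, memo.size + 1 ≤ g → pvGetPaths links g k = v)

theorem pvInv_empty (links : List (Int × List Int)) : pvInv links PySem.Dict.empty := by
  refine ⟨by simp [pysem], ?_, ?_⟩
  · intro k hk; simp [pysem] at hk
  · intro k v hk; simp [pysem] at hk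

theorem pvNotContains_get? {ν : Type} (d : PySem.Dict Int ν) (k : Int) (h : d.contains k = false) :
    d.get? k = none := by
  cases hh : d.get? k with
  | none => rfl
  | some v =>
    rw [PySem.Dict.contains_eq_isSome_get?, hh] at h
    simp at h

theorem pvInv_size_le (links : List (Int × List Int)) (memo : PySem.Dict Int (List (List Int))) (hinv : pvInv links memo) :
    memo.size ≤ links.length := by
  obtain ⟨hnd, hkeys, _⟩ := hinv
  have hsub : memo.keys ⊆ links.map Prod.fst := by
    intro k hk
    have hc : (memo.get? k).isSome = true := by
      rw [← PySem.Dict.contains_eq_isSome_get?]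
      exact (PySem.Dict.contains_iff_mem_keys memo k).mpr hk
    have := hkeys k hc
    have : k ∈ (PySem.Dict.mk links).keys := (PySem.Dict.contains_iff_mem_keys _ k).mp this
    simpa using this
  calc memo.size = memo.keys.length := by simp [PySem.Dict.size, PySem.Dict.keys]
    _ = memo.keys.toFinset.card := (List.toFinset_card_of_nodup hnd).symm
    _ ≤ (links.map Prod.fst).toFinset.card := Finset.card_le_card (fun x hx => by
          rw [List.mem_toFinset] at hx ⊢; exact hsub hx)
    _ ≤ (links.map Prod.fst).length := List.toFinset_card_le _
    _ = links.length := List.length_map ..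

theorem pvGetPaths_succ_of_some (links : List (Int × List Int)) (g : Nat) (page_id : Int) (parents : List Int)
    (h : PySem.Dict.get? (PySem.Dict.mk links) page_id = some parents) :
    pvGetPaths links (g + 1) page_id
      = parents.flatMap (fun p => (pvGetPaths links g p).map (fun bp => bp ++ [page_id])) := by
  rw [pvGetPaths, h]
  simp only [PySem.List.foldl_append_singleton_eq_map]
  rw [PySem.List.foldl_append_eq_flatMap
    (fun p => (pvGetPaths links g p).map (· ++ [page_id])) parents []]
  rfl

theorem pvGrounded_keys (links : List (Int × List Int)) (n : Nat) (k : Int)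
    (h : k ∈ pvGroundedIter links n) : (PySem.Dict.mk links).contains k = true := by
  cases n with
  | zero => simp [pvGroundedIter] at h
  | succ n =>
    rw [pvGroundedIter, List.mem_filter] at h
    rw [PySem.Dict.contains_iff_mem_keys]
    simpa using h.1

theorem pvGrounded_pos (links : List (Int × List Int)) (n : Nat) (k : Int)
    (h : k ∈ pvGroundedIter links n) : 1 ≤ n := by
  cases n with
  | zero => simp [pvGroundedIter] at h
  | succ n => omega

theorem pvGrounded_mono (links : List (Int × List Int)) : ∀ (n : Nat) (k : Int),
    k ∈ pvGroundedIter links n → k ∈ pvGroundedIter links (n + 1) := by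
  intro n
  induction n with
  | zero => intro k h; simp [pvGroundedIter] at h
  | succ n ih =>
    intro k h
    rw [pvGroundedIter, List.mem_filter] at h ⊢
    refine ⟨h.1, ?_⟩
    rw [List.all_eq_true] at h ⊢
    intro p hp
    have := h.2 p hp
    by_cases hc : (PySem.Dict.mk links).contains p = true
    · simp only [hc, Bool.not_true, Bool.false_or] at this ⊢
      rw [List.contains_iff_mem] at this ⊢
      exact ih p this
    · simp only [Bool.not_eq_true] at hc
      simp [hc]

theorem pvGrounded_le (links : List (Int × List Int)) (m n : Nat) (h : m ≤ n) (k : Int)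
    (hk : k ∈ pvGroundedIter links m) : k ∈ pvGroundedIter links n := by
  induction n with
  | zero =>
    have : m = 0 := by omega
    subst this; exact hk
  | succ n ih =>
    rcases Nat.lt_or_ge m (n+1) with hlt | hge
    · exact pvGrounded_mono links n k (ih (by omega))
    · have : m = n + 1 := by omega
      subst this; exact hk

-- minimal grounded level
theorem pvGrounded_minimal (links : List (Int × List Int)) (n : Nat) (k : Int)
    (h : k ∈ pvGroundedIter links n) :
    ∃ m, 1 ≤ m ∧ m ≤ n ∧ k ∈ pvGroundedIter links m ∧ k ∉ pvGroundedIter links (m - 1) := by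
  classical
  have hex : ∃ m, k ∈ pvGroundedIter links m := ⟨n, h⟩
  let m := Nat.find hex
  have hm : k ∈ pvGroundedIter links m := Nat.find_spec hex
  have h1 : 1 ≤ m := pvGrounded_pos links m k hm
  refine ⟨m, h1, Nat.find_min' hex h, hm, ?_⟩
  intro hmem
  exact Nat.find_min hex (by omega : m - 1 < m) hmem

-- One parent-list fold of the memoised recursion, assuming the main claim below at lower levels.
theorem pvMemoFoldAux (links : List (Int × List Int)) (n : Nat) (hn : 1 ≤ n) (page : Int) (f : Nat) (hf : n ≤ f)
    (IH : ∀ m, m < n → ∀ (page' : Int) (fuel : Nat) (memo : PySem.Dict Int (List (List Int))),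
      pvInv links memo →
      page' ∈ pvGroundedIter links m → page' ∉ pvGroundedIter links (m - 1) →
      m + 1 ≤ fuel →
      pvInv links (pvGetPathsMemo links fuel page' memo).1 ∧
      (∀ k v, memo.get? k = some v → ((pvGetPathsMemo links fuel page' memo).1).get? k = some v) ∧
      memo.size ≤ (pvGetPathsMemo links fuel page' memo).1.size ∧
      (∀ k, (((pvGetPathsMemo links fuel page' memo).1).get? k).isSome = true →
          (memo.get? k).isSome = true ∨ k ∈ pvGroundedIter links m) ∧
      (((pvGetPathsMemo links fuel page' memo).1).get? page').isSome = true ∧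
      (pvGetPathsMemo links fuel page' memo).2 = (((pvGetPathsMemo links fuel page' memo).1).get? page').getD [[]]) :
    ∀ (ps : List Int) (memo : PySem.Dict Int (List (List Int))) (res₀ : List (List Int)),
      pvInv links memo →
      (∀ p ∈ ps, (PySem.Dict.mk links).contains p = false ∨ p ∈ pvGroundedIter links (n - 1)) →
      ∀ m' res, ps.foldl (fun (st : PySem.Dict Int (List (List Int)) × List (List Int)) p =>
          let r := pvGetPathsMemo links f p st.1
          (r.1, st.2 ++ r.2.map (fun bp => bp ++ [page]))) (memo, res₀) = (m', res) →
      pvInv links m' ∧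
      (∀ k v, memo.get? k = some v → m'.get? k = some v) ∧
      memo.size ≤ m'.size ∧
      (∀ k, (m'.get? k).isSome = true → (memo.get? k).isSome = true ∨ k ∈ pvGroundedIter links (n - 1)) ∧
      (∀ p ∈ ps, (PySem.Dict.mk links).contains p = true → (m'.get? p).isSome = true) ∧
      res = res₀ ++ ps.flatMap (fun p => ((m'.get? p).getD [[]]).map (fun bp => bp ++ [page])) := by
  intro ps
  induction ps with
  | nil =>
    intro memo res₀ hinv _ m' res heq
    simp only [List.foldl_nil] at heq
    obtain ⟨rfl, rfl⟩ := Prod.mk.injEq .. ▸ heq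
    refine ⟨hinv, fun k v h => h, le_refl _, fun k h => Or.inl h, by simp, by simp⟩
  | cons p ps ih =>
    intro memo res₀ hinv hpar m' res heq
    simp only [List.foldl_cons] at heq
    rcases hpar p List.mem_cons_self with hc | hgp
    · -- parent not a key of links: recursion returns [[]] and leaves memo unchanged
      obtain ⟨f', rfl⟩ : ∃ f', f = f' + 1 := ⟨f - 1, by omega⟩
      have hr : pvGetPathsMemo links (f' + 1) p memo = (memo, [[]]) := by
        simp only [pvGetPathsMemo, pvNotContains_get? _ _ hc]
      rw [hr] at heq
      have hmemo_p : memo.get? p = none := by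
        cases hh : memo.get? p with
        | none => rfl
        | some v =>
          have := hinv.2.1 p (by rw [hh]; rfl)
          rw [this] at hc; cases hc
      obtain ⟨h1, h2, h3, h4, h5, h6⟩ :=
        ih memo (res₀ ++ [[]].map (fun bp => bp ++ [page]))
          hinv (fun q hq => hpar q (List.mem_cons_of_mem _ hq)) m' res heq
      have hm'p : m'.get? p = none := by
        cases hh : m'.get? p with
        | none => rfl
        | some v =>
          rcases h4 p (by rw [hh]; rfl) with hs | hgr
          · rw [hmemo_p] at hs; cases hs
          · have := pvGrounded_keys links (n - 1) p hgr
            rw [this] at hc; cases hc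
      refine ⟨h1, h2, h3, h4, ?_, ?_⟩
      · intro q hq hcq
        rcases List.mem_cons.mp hq with rfl | hq'
        · rw [hcq] at hc; cases hc
        · exact h5 q hq' hcq
      · rw [h6, List.flatMap_cons, hm'p]
        simp [List.append_assoc]
    · -- parent is grounded: use the main claim at its minimal level
      obtain ⟨m, hm1, hmle, hpm, hpmin⟩ := pvGrounded_minimal links (n - 1) p hgp
      obtain ⟨r1inv, r1pres, r1size, r1new, r1some, r1res⟩ :=
        IH m (by omega) p f memo hinv hpm hpmin (by omega)
      set r := pvGetPathsMemo links f p memo with hrdef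
      rw [r1res] at heq
      obtain ⟨h1, h2, h3, h4, h5, h6⟩ :=
        ih r.1 (res₀ ++ ((r.1.get? p).getD [[]]).map (fun bp => bp ++ [page]))
          r1inv (fun q hq => hpar q (List.mem_cons_of_mem _ hq)) m' res heq
      obtain ⟨b, hb⟩ := Option.isSome_iff_exists.mp r1some
      have hm'b : m'.get? p = some b := h2 p b hb
      refine ⟨h1, ?_, le_trans r1size h3, ?_, ?_, ?_⟩
      · intro k v hkv; exact h2 k v (r1pres k v hkv)
      · intro k hk
        rcases h4 k hk with hs | hgr
        · rcases r1new k hs with hs' | hgr'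
          · exact Or.inl hs'
          · exact Or.inr (pvGrounded_le links m (n - 1) (by omega) k hgr')
        · exact Or.inr hgr
      · intro q hq hcq
        rcases List.mem_cons.mp hq with rfl | hq'
        · rw [hm'b]; rfl
        · exact h5 q hq' hcq
      · rw [h6, List.flatMap_cons, hm'b, hb]
        simp [List.append_assoc]

-- Main claim about the memoised recursion: on a page grounded at minimal level n, with enough fuel,
-- it preserves and extends a correct memo and returns that page's cached path list.
theorem pvMemoMain (links : List (Int × List Int)) :
    ∀ (n : Nat) (page : Int) (fuel : Nat) (memo : PySem.Dict Int (List (List Int))),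
      pvInv links memo →
      page ∈ pvGroundedIter links n → page ∉ pvGroundedIter links (n - 1) →
      n + 1 ≤ fuel →
      pvInv links (pvGetPathsMemo links fuel page memo).1 ∧
      (∀ k v, memo.get? k = some v → ((pvGetPathsMemo links fuel page memo).1).get? k = some v) ∧
      memo.size ≤ (pvGetPathsMemo links fuel page memo).1.size ∧
      (∀ k, (((pvGetPathsMemo links fuel page memo).1).get? k).isSome = true →
          (memo.get? k).isSome = true ∨ k ∈ pvGroundedIter links n) ∧
      (((pvGetPathsMemo links fuel page memo).1).get? page).isSome = true ∧
      (pvGetPathsMemo links fuel page memo).2 = (((pvGetPathsMemo links fuel page memo).1).get? page).getD [[]] := by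
  intro n
  induction n using Nat.strong_induction_on with
  | _ n IH =>
  intro page fuel memo hinv hg hgmin hfuel
  have hn1 : 1 ≤ n := pvGrounded_pos links n page hg
  have hcont : (PySem.Dict.mk links).contains page = true := pvGrounded_keys links n page hg
  obtain ⟨parents, hget⟩ : ∃ parents, (PySem.Dict.mk links).get? page = some parents := by
    rw [PySem.Dict.contains_eq_isSome_get?] at hcont
    exact Option.isSome_iff_exists.mp hcont
  obtain ⟨f, rfl⟩ : ∃ f, fuel = f + 1 := ⟨fuel - 1, by omega⟩
  cases hmp : memo.get? page with
  | some cached =>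
    have hres : pvGetPathsMemo links (f + 1) page memo = (memo, cached) := by
      simp only [pvGetPathsMemo, hget, hmp]
    rw [hres]
    refine ⟨hinv, fun k v h => h, le_refl _, fun k h => Or.inl h, by rw [hmp]; rfl, by rw [hmp]; rfl⟩
  | none =>
    -- parents of a grounded page: not keys, or grounded one level below
    have hpar : ∀ p ∈ parents, (PySem.Dict.mk links).contains p = false ∨ p ∈ pvGroundedIter links (n - 1) := by
      have hg' : page ∈ pvGroundedIter links ((n - 1) + 1) := by
        have : (n - 1) + 1 = n := by omega
        rw [this]; exact hg
      rw [pvGroundedIter, List.mem_filter] at hg'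
      have hcond := hg'.2
      rw [hget] at hcond
      simp only [Option.getD_some, List.all_eq_true] at hcond
      intro p hp
      have := hcond p hp
      by_cases hc : (PySem.Dict.mk links).contains p = true
      · simp only [hc, Bool.not_true, Bool.false_or] at this
        exact Or.inr (by simpa using this)
      · exact Or.inl (by simp only [Bool.not_eq_true] at hc; exact hc)
    obtain ⟨st1, st2, hst⟩ : ∃ st1 st2, parents.foldl (fun (st : PySem.Dict Int (List (List Int)) × List (List Int)) p =>
        let r := pvGetPathsMemo links f p st.1
        (r.1, st.2 ++ r.2.map (fun bp => bp ++ [page]))) (memo, []) = (st1, st2) :=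
      ⟨_, _, rfl⟩
    obtain ⟨s1, s2, s3, s4, s5, s6⟩ :=
      pvMemoFoldAux links n hn1 page f (by omega) IH parents memo [] hinv hpar st1 st2 hst
    have hres : pvGetPathsMemo links (f + 1) page memo = (st1.insert page st2, st2) := by
      simp only [pvGetPathsMemo, hget, hmp, hst]
    rw [hres]
    have hst1page : st1.get? page = none := by
      cases hh : st1.get? page with
      | none => rfl
      | some v =>
        rcases s4 page (by rw [hh]; rfl) with hs | hgr
        · rw [hmp] at hs; cases hs
        · exact absurd hgr hgmin
    have hfresh : st1.contains page = false := by
      rw [PySem.Dict.contains_eq_isSome_get?, hst1page]; rfl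
    have hsize : (st1.insert page st2).size = st1.size + 1 := by
      rw [PySem.Dict.size_insert, hfresh]; simp
    refine ⟨?_, ?_, ?_, ?_, ?_, ?_⟩
    · -- pvInv of the extended memo
      refine ⟨PySem.Dict.nodup_keys_insert _ _ _ s1.1, ?_, ?_⟩
      · intro k hk
        rw [PySem.Dict.get?_insert] at hk
        by_cases hkp : k = page
        · subst hkp; exact hcont
        · rw [if_neg hkp] at hk; exact s1.2.1 k hk
      · intro k v hk g hg
        rw [hsize] at hg
        rw [PySem.Dict.get?_insert] at hk
        by_cases hkp : k = page
        · subst hkp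
          rw [if_pos rfl] at hk
          injection hk with hk
          obtain ⟨g', rfl⟩ : ∃ g', g = g' + 1 := ⟨g - 1, by omega⟩
          rw [pvGetPaths_succ_of_some links g' k parents hget]
          subst hk
          rw [s6, List.nil_append]
          apply List.flatMap_congr
          intro p hp
          rcases hpar p hp with hc | hgr
          · have hnone : st1.get? p = none := by
              cases hh : st1.get? p with
              | none => rfl
              | some w =>
                have := s1.2.1 p (by rw [hh]; rfl)
                rw [this] at hc; cases hc
            rw [hnone]
            obtain ⟨g'', rfl⟩ : ∃ g'', g' = g'' + 1 := ⟨g' - 1, by omega⟩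
            rw [pvGetPaths, pvNotContains_get? _ _ hc]
            rfl
          · have hcp := pvGrounded_keys links (n - 1) p hgr
            obtain ⟨b, hb⟩ := Option.isSome_iff_exists.mp (s5 p hp hcp)
            rw [hb]
            rw [s1.2.2 p b hb g' (by omega)]
            rfl
        · rw [if_neg hkp] at hk
          exact s1.2.2 k v hk g (by omega)
    · intro k v hkv
      have h1 := s2 k v hkv
      have hkp : k ≠ page := by
        intro h; subst h; rw [hmp] at hkv; cases hkv
      rw [PySem.Dict.get?_insert, if_neg hkp]
      exact h1
    · rw [hsize]; omega
    · intro k hk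
      rw [PySem.Dict.get?_insert] at hk
      by_cases hkp : k = page
      · subst hkp; exact Or.inr hg
      · rw [if_neg hkp] at hk
        rcases s4 k hk with hs | hgr
        · exact Or.inl hs
        · exact Or.inr (pvGrounded_le links (n - 1) n (by omega) k hgr)
    · rw [PySem.Dict.get?_insert_self]; rfl
    · rw [PySem.Dict.get?_insert_self]; rfl

-- Corollary: with fuel links.length + 1, on a page admitted by Pre_, the memoised recursion
-- returns exactly A's fuelled get_paths value and keeps the memo invariant.
theorem pvMemo_correct (links : List (Int × List Int)) (page : Int) (memo : PySem.Dict Int (List (List Int)))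
    (hinv : pvInv links memo)
    (hgr : (PySem.Dict.mk links).contains page = true → page ∈ pvGroundedIter links links.length) :
    pvInv links (pvGetPathsMemo links (links.length + 1) page memo).1 ∧
    (pvGetPathsMemo links (links.length + 1) page memo).2 = pvGetPaths links (links.length + 1) page := by
  by_cases hc : (PySem.Dict.mk links).contains page = true
  · obtain ⟨m, hm1, hmle, hpm, hpmin⟩ := pvGrounded_minimal links links.length page (hgr hc)
    obtain ⟨c1, _, _, _, c5, c6⟩ :=
      pvMemoMain links m page (links.length + 1) memo hinv hpm hpmin (by omega)
    refine ⟨c1, ?_⟩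
    obtain ⟨v, hv⟩ := Option.isSome_iff_exists.mp c5
    rw [c6, hv]
    have hsz := pvInv_size_le links _ c1
    rw [c1.2.2 page v hv (links.length + 1) (by omega)]
    rfl
  · simp only [Bool.not_eq_true] at hc
    have hnone := pvNotContains_get? (PySem.Dict.mk links) page hc
    constructor
    · simp only [pvGetPathsMemo, hnone]
      exact hinv
    · simp only [pvGetPathsMemo, hnone]
      rw [pvGetPaths, hnone]

def pvFA (vf vb : List (Int × List Int)) (ub : List Int) (page_id : Int) : List (List Int) :=
  if ub.contains page_id then
    (pvGetPaths vf (vf.length + 1) page_id).flatMap (fun fp =>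
      (pvGetPaths vb (vb.length + 1) page_id).map (fun tp => fp.dropLast ++ tp.reverse))
  else []

theorem pvLoop (vf vb : List (Int × List Int)) (ub : List Int) :
    ∀ (l : List Int) (mf mb : PySem.Dict Int (List (List Int))) (out : List (List Int)),
    pvInv vf mf → pvInv vb mb →
    (∀ p ∈ l, p ∈ ub →
      ((PySem.Dict.mk vf).contains p = true → p ∈ pvGroundedIter vf vf.length) ∧
      ((PySem.Dict.mk vb).contains p = true → p ∈ pvGroundedIter vb vb.length)) →
    (l.foldl (fun (st : PySem.Dict Int (List (List Int)) × PySem.Dict Int (List (List Int)) × List (List Int)) page_id =>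
        if PySem.Set.contains (PySem.Set.ofList ub) page_id then
          let rf := pvGetPathsMemo vf (vf.length + 1) page_id st.1
          let rb := pvGetPathsMemo vb (vb.length + 1) page_id st.2.1
          (rf.1, rb.1, st.2.2 ++ rf.2.flatMap (fun fp => rb.2.map (fun tp => fp.dropLast ++ tp.reverse)))
        else st) (mf, mb, out)).2.2
      = out ++ l.flatMap (pvFA vf vb ub) := by
  intro l
  induction l with
  | nil => intro mf mb out _ _ _; simp
  | cons page l ih =>
    intro mf mb out hf hb hsub
    have hc : PySem.Set.contains (PySem.Set.ofList ub) page = ub.contains page := by simp [pysem]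
    simp only [List.foldl_cons, hc]
    by_cases h : ub.contains page = true
    · rw [if_pos h]
      have hub : page ∈ ub := by simpa using h
      have hgrs := hsub page List.mem_cons_self hub
      obtain ⟨hf1, hf2⟩ := pvMemo_correct vf page mf hf hgrs.1
      obtain ⟨hb1, hb2⟩ := pvMemo_correct vb page mb hb hgrs.2
      rw [ih _ _ _ hf1 hb1 (fun q hq => hsub q (List.mem_cons_of_mem _ hq))]
      rw [hf2, hb2]
      rw [List.flatMap_cons, pvFA, if_pos h]
      simp [List.append_assoc]
    · rw [if_neg h]
      rw [ih _ _ _ hf hb (fun q hq => hsub q (List.mem_cons_of_mem _ hq))]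
      rw [List.flatMap_cons, pvFA, if_neg h]
      simp

theorem get_combined_paths_eq (visited_forward : List (Int × List Int)) (unvisited_forward : List Int) (visited_backward : List (Int × List Int)) (unvisited_backward : List Int)
    (hpre : Pre_get_combined_paths visited_forward unvisited_forward visited_backward unvisited_backward) :
    get_combined_paths visited_forward unvisited_forward visited_backward unvisited_backward
      = get_combined_paths_alt visited_forward unvisited_forward visited_backward unvisited_backward := by
  obtain ⟨hndf, hndb, hgr⟩ := hpre
  rw [get_combined_paths]
  rw [PySem.List.foldl_congr_mem unvisited_forward _
    (fun paths page_id => paths ++ pvFA visited_forward visited_backward unvisited_backward page_id) []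
    (by
      intro paths page_id _
      simp only [pvFA]
      by_cases h : unvisited_backward.contains page_id = true
      · simp only [h, if_true]
        simp only [PySem.List.foldl_append_singleton_eq_map]
        rw [PySem.List.foldl_append_eq_flatMap
          (fun from_path =>
            (pvGetPaths visited_backward (visited_backward.length + 1) page_id).map (fun to_path =>
              from_path.dropLast ++ to_path.reverse))
          (pvGetPaths visited_forward (visited_forward.length + 1) page_id) paths]
      · have h' : page_id ∉ unvisited_backward := by simpa using h
        simp [h'])]
  rw [PySem.List.foldl_append_eq_flatMap]
  rw [get_combined_paths_alt]
  rw [pvLoop visited_forward visited_backward unvisited_backward unvisited_forward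
    PySem.Dict.empty PySem.Dict.empty [] (pvInv_empty _) (pvInv_empty _)
    (fun p hp hub => hgr p hp hub)]

-- ===== VERDICT (by name: the statement is the Claim_ definition above) =====
theorem get_combined_paths_spec : Claim_equal_get_combined_paths := by
  intro vf uf vb ub _ hpre
  exact get_combined_paths_eq vf uf vb ub hpre
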